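-- pv_equiv track=rewrite | github.com/wrr008123/GIS-data-process-analysis | my_utils.py | parallel_remove_none
-- ===== SOURCE A (Python) =====
-- def parallel_remove_none(x, y):
--     new_x = []
--     new_y = []
--
--     for a, b in zip(x, y):
--         if a is not None and b is not None:
--             new_x.append(a)
--             new_y.append(b)
--     return new_x, new_y
-- ===== SOURCE B (Python) =====
-- def parallel_remove_none(x, y):
--     n = min(len(x), len(y))
--     keep = [i for i in range(n) if x[i] is not None and y[i] is not None]
--     return [x[i] for i in keep], [y[i] for i in keep]
-- ===== Notes on version B (the rewrite author's own statement) =====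
-- stated objective: alternative
-- what changed: B is index-based: it first computes the list of indices at which both elements survive, then gathers the two result lists by random access with those indices, instead of a single zip pass appending to two parallel accumulators.
import Mathlib
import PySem

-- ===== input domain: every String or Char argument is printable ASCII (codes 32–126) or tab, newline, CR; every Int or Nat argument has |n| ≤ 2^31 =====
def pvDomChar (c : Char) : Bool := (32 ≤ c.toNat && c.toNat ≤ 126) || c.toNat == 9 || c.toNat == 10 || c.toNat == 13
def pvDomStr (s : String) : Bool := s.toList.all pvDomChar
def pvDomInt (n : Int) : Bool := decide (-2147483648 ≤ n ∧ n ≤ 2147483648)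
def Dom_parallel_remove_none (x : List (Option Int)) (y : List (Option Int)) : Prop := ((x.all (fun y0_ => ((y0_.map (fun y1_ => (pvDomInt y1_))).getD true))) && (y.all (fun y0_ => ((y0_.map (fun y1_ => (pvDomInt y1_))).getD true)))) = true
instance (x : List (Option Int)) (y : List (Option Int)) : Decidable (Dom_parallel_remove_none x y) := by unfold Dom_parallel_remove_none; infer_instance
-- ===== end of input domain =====

-- B is index-based (compute surviving indices, then gather by random access) instead of a zip pass with two accumulators; same cost, alternative structure.
-- ===== PORT A =====
-- A: loop over zip(x,y), appending to two parallel accumulators new_x, new_y.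
def parallel_remove_none (x : List (Option Int)) (y : List (Option Int)) : List Int × List Int :=
  (List.zip x y).foldl
    (fun acc ab =>
      match ab with
      | (some a, some b) => (acc.1 ++ [a], acc.2 ++ [b])
      | _ => acc)
    ([], [])

-- ===== PORT B =====
-- keep = [i for i in range(n) if x[i] is not None and y[i] is not None], n = min(len(x), len(y)).
-- Every i produced lies in range for both lists, so x[i] is ported with pyGetD (default none, never used).
def pvKeep (x : List (Option Int)) (y : List (Option Int)) : List Int :=
  (PySem.List.pyRange 0 (min (x.length : Int) (y.length : Int)) 1).filter
    (fun i => (PySem.List.pyGetD x i none).isSome && (PySem.List.pyGetD y i none).isSome)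

def parallel_remove_none_alt (x : List (Option Int)) (y : List (Option Int)) : List Int × List Int :=
  let keep := pvKeep x y
  -- [x[i] for i in keep]: each x[i] is known non-None, so the comprehension is a filterMap of the lookups
  (keep.filterMap (fun i => PySem.List.pyGetD x i none),
   keep.filterMap (fun i => PySem.List.pyGetD y i none))

-- ===== PRECONDITION & SPEC =====
def Spec_parallel_remove_none (x : List (Option Int)) (y : List (Option Int)) (out : List Int × List Int) : Prop := out = parallel_remove_none_alt x y
instance (x : List (Option Int)) (y : List (Option Int)) (out : List Int × List Int) : Decidable (Spec_parallel_remove_none x y out) := by unfold Spec_parallel_remove_none; infer_instance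

-- ===== CLAIM =====
def Claim_equal_parallel_remove_none : Prop := ∀ (x : List (Option Int)) (y : List (Option Int)), Dom_parallel_remove_none x y → Spec_parallel_remove_none x y (parallel_remove_none x y)

-- ===== LEMMAS AND PROOFS =====

-- the filtered zip list that both sides compute, in A's formulation
def pvF (x y : List (Option Int)) : List (Int × Int) :=
  (List.zip x y).filterMap (fun ab => match ab with
    | (some a, some b) => some (a, b) | _ => none)

-- loop invariant for A's fold
theorem pvFold_eq (l : List (Option Int × Option Int)) : ∀ (p q : List Int),
    l.foldl (fun acc ab => match ab with
      | (some a, some b) => (acc.1 ++ [a], acc.2 ++ [b])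
      | _ => acc) (p, q)
    = (p ++ (l.filterMap (fun ab => match ab with
        | (some a, some b) => some (a, b) | _ => none)).map Prod.fst,
       q ++ (l.filterMap (fun ab => match ab with
        | (some a, some b) => some (a, b) | _ => none)).map Prod.snd) := by
  induction l with
  | nil => simp
  | cons hd tl ih =>
    intro p q
    obtain ⟨a, b⟩ := hd
    cases a <;> cases b <;> simp [List.foldl, ih]

-- the Nat-index version of B's computation equals gathering from the filtered zip
theorem pvGather_eq (x : List (Option Int)) : ∀ (y : List (Option Int)),
    (((List.range (min x.length y.length)).filter
        (fun k => (x.getD k none).isSome && (y.getD k none).isSome)).filterMap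
          (fun k => x.getD k none),
     ((List.range (min x.length y.length)).filter
        (fun k => (x.getD k none).isSome && (y.getD k none).isSome)).filterMap
          (fun k => y.getD k none))
    = ((pvF x y).map Prod.fst, (pvF x y).map Prod.snd) := by
  induction x with
  | nil => intro y; simp [pvF]
  | cons a x ih =>
    intro y
    cases y with
    | nil => simp [pvF]
    | cons b y =>
      have h := ih y
      simp only [Prod.mk.injEq] at h
      simp only [List.length_cons, Nat.succ_min_succ]
      rw [List.range_succ_eq_map]
      cases a <;> cases b <;>
        simp_all [pvF, List.filter_map, List.filterMap_map, Function.comp_def]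

-- ===== VERDICT =====
theorem parallel_remove_none_spec : Claim_equal_parallel_remove_none := by
  intro x y _
  show parallel_remove_none x y = parallel_remove_none_alt x y
  unfold parallel_remove_none parallel_remove_none_alt pvKeep
  rw [pvFold_eq]
  have hmin : (min (x.length : Int) (y.length : Int)) = ((min x.length y.length : Nat) : Int) := by
    simp [Nat.min_def, Int.min_def]
  rw [hmin, PySem.List.pyRange_one]
  simp only [Int.sub_zero, Int.toNat_natCast, zero_add, List.filter_map,
    List.filterMap_map, Function.comp_def, PySem.List.pyGetD_natCast]
  have := pvGather_eq x y
  simp only [Prod.mk.injEq] at this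
  rw [this.1, this.2]
  simp [pvF]
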